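-- pv_equiv track=rewrite | github.com/wolfy916/Algorithm | 02_Algorithm/problems/programmers/pro_greedy_joystick.py | solution
-- ===== SOURCE A (Python) =====
-- def solution(name):
--     answer = 0
--     lenV = len(name)
--     numberOfChangeChar = 0
--
--     for i in range(lenV):
--         if name[i] != "A":
--             numberOfChangeChar += 1
--             answer += min(abs(ord("A") - ord(name[i])), abs(ord("Z") - ord(name[i])) + 1)
--
--     used = []
--     if name[0] != "A":
--         used = [0]
--
--     q = [(0, used, 0)]
--     while q:
--         move, used, v = q.pop(0)
--         if len(used) == numberOfChangeChar:
--             answer += move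
--             break
--         else:
--             delta = [v - 1, v + 1]
--             if v == lenV - 1:
--                 delta[1] = 0
--             elif v == 0:
--                 delta[0] = lenV - 1
--             for w in delta:
--                 if name[w] == "A":
--                     q.append((move + 1, used, w))
--                 else:
--                     if w not in used:
--                         q.append((move + 1, used + [w], w))
--                     else:
--                         q.append((move + 1, used, w))
--     return answer
-- ===== SOURCE B (Python) =====
-- def solution(name):
--     n = len(name)
--     answer = sum(min(abs(ord(c) - 65), abs(90 - ord(c)) + 1) for c in name if c != "A")
--     full = 0
--     for i, c in enumerate(name):
--         if c != "A":
--             full |= 1 << i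
--     frontier = {(0, full & 1)}
--     depth = 0
--     while all(u != full for (_, u) in frontier):
--         frontier = {(w, u | (full & (1 << w)))
--                     for (v, u) in frontier
--                     for w in ((v - 1) % n, (v + 1) % n)}
--         depth += 1
--     return answer + depth
-- ===== Notes on version B (the rewrite author's own statement) =====
-- stated objective: faster
-- what changed: A runs a FIFO-queue BFS over whole paths with no deduplication (the queue doubles at every depth, ~2^depth entries); B advances the search level by level over a deduplicated set of (cursor, visited-bitmask) states, so each depth handles at most n*2^k distinct states instead of 2^depth paths.
import Mathlib
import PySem

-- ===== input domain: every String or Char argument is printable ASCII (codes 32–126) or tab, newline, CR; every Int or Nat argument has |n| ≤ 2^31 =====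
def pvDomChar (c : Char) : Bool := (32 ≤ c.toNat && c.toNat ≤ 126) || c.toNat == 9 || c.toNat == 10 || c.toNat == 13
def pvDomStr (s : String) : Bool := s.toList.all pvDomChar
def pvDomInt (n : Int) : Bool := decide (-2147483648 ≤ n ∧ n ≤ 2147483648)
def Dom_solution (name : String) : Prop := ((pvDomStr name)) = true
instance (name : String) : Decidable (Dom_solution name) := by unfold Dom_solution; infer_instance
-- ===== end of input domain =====

-- B replaces A's exponential FIFO queue of paths by a level-synchronous BFS over DEDUPLICATED
-- (cursor, visited-bitmask) states (objective: faster — far fewer states per level).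

-- ===== PORT A =====
-- the two queue entries A appends for one popped state (the body of A's `for w in delta` loop;
-- `delta[1] = 0` / `delta[0] = lenV - 1` are the pySetD updates)
def chA (cs : List Char) (lenV move : Int) (used : List Int) (v : Int) :
    List (Int × List Int × Int) :=
  let delta0 : List Int := [v - 1, v + 1]
  let delta : List Int :=
    if v = lenV - 1 then PySem.List.pySetD delta0 1 0
    else if v = 0 then PySem.List.pySetD delta0 0 (lenV - 1)
    else delta0
  delta.foldl (fun acc w =>
    if PySem.List.pyGetD cs w 'A' = 'A' then acc ++ [(move + 1, used, w)]
    else if w ∉ used then acc ++ [(move + 1, used ++ [w], w)]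
    else acc ++ [(move + 1, used, w)]) []

-- A's `while q:` loop; the fuel only makes the recursion structural (2^len(name) iterations
-- always suffice, as the proofs below show: the BFS breaks by depth len(name) - 1)
def loopA (cs : List Char) (lenV G : Int) :
    Nat → List (Int × List Int × Int) → Int → Int
  | 0, _, answer => answer
  | _ + 1, [], answer => answer
  | fuel + 1, (move, used, v) :: rest, answer =>
    if PySem.List.len used = G then answer + move
    else loopA cs lenV G fuel (rest ++ chA cs lenV move used v) answer

def solution (name : String) : Int :=
  let cs := name.toList
  let lenV : Int := PySem.List.len cs
  -- A's first for-loop: (answer, numberOfChangeChar) accumulated together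
  let p : Int × Int := (PySem.List.pyRange 0 lenV).foldl
    (fun ac i =>
      if PySem.List.pyGetD cs i 'A' ≠ 'A' then
        (ac.1 + min |65 - ((PySem.List.pyGetD cs i 'A').toNat : Int)|
                    (|90 - ((PySem.List.pyGetD cs i 'A').toNat : Int)| + 1),
         ac.2 + 1)
      else ac) (0, 0)
  -- name[0] raises IndexError on the empty string: excluded by Pre_solution (default never read inside Pre_)
  let used : List Int := if PySem.List.pyGetD cs 0 ' ' ≠ 'A' then [0] else []
  loopA cs lenV p.2 (2 ^ cs.length) [(0, used, 0)] p.1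

-- ===== PORT B =====
-- successors of one frontier state (the inner generator of Source B's set comprehension)
def chB (full n : Int) (s : Int × Int) : List (Int × Int) :=
  [PySem.Int.mod (s.1 - 1) n, PySem.Int.mod (s.1 + 1) n].map
    (fun w => (w, PySem.Int.bor s.2 (PySem.Int.band full ((1 : Int) <<< w.toNat))))

-- Source B's `while all(u != full ...)` loop; fuel len(name) + 1 always suffices (proved below)
def loopB (full n : Int) : Nat → PySem.Set (Int × Int) → Int → Int
  | 0, _, depth => depth
  | fuel + 1, frontier, depth =>
    if frontier.all (fun s => s.2 != full) then
      loopB full n fuel (PySem.Set.ofList (frontier.flatMap (chB full n))) (depth + 1)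
    else depth

def solution_alt (name : String) : Int :=
  let cs := name.toList
  let n : Int := PySem.List.len cs
  let answer : Int := ((cs.filter (fun c => c ≠ 'A')).map
    (fun c => min |(c.toNat : Int) - 65| (|90 - (c.toNat : Int)| + 1))).sum
  let full : Int := (PySem.List.enumerate cs).foldl
    (fun m p => if p.2 ≠ 'A' then PySem.Int.bor m ((1 : Int) <<< (p.1.toNat : Nat)) else m) 0
  answer + loopB full n (cs.length + 1) (PySem.Set.ofList [(0, PySem.Int.band full 1)]) 0

-- ===== PRECONDITION & SPEC =====
-- A evaluates name[0] unconditionally, so it raises IndexError exactly on the empty string.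
def Pre_solution (name : String) : Prop := name ≠ ""
instance (name : String) : Decidable (Pre_solution name) := by unfold Pre_solution; infer_instance
def pvWitness_solution : String := "BAZ"

def Spec_solution (name : String) (out : Int) : Prop := out = solution_alt name
instance (name : String) (out : Int) : Decidable (Spec_solution name out) := by
  unfold Spec_solution; infer_instance

-- ===== CLAIM (what is proved, stated in full; the proofs are below) =====
def Claim_equal_solution : Prop :=
  ∀ (name : String), Dom_solution name → Pre_solution name → Spec_solution name (solution name)

-- ===== LEMMAS AND PROOFS =====

-- ---- abstract single-state objects ----

-- untagged A-state: (used, v)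
def chU (cs : List Char) (lenV : Int) (s : List Int × Int) : List (List Int × Int) :=
  (if s.2 = lenV - 1 then [s.2 - 1, 0]
   else if s.2 = 0 then [lenV - 1, s.2 + 1]
   else [s.2 - 1, s.2 + 1]).map (fun w =>
    (if PySem.List.pyGetD cs w 'A' = 'A' then s.1
     else if w ∉ s.1 then s.1 ++ [w]
     else s.1, w))

def LvlA (cs : List Char) (lenV : Int) (s0 : List Int × Int) : Nat → List (List Int × Int)
  | 0 => [s0]
  | d + 1 => (LvlA cs lenV s0 d).flatMap (chU cs lenV)

def maskOf (l : List Int) : Nat := l.foldl (fun m i => m ||| 1 <<< i.toNat) 0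

def absU (s : List Int × Int) : Int × Int := (s.2, (maskOf s.1 : Int))

def tgtI (cs : List Char) : List Int :=
  (PySem.List.pyRange 0 (PySem.List.len cs)).filter
    (fun i => PySem.List.pyGetD cs i 'A' ≠ 'A')

def fullN (cs : List Char) : Nat := maskOf (tgtI cs)

def InvU (cs : List Char) (s : List Int × Int) : Prop :=
  s.1.Nodup ∧ (∀ i ∈ s.1, i ∈ tgtI cs) ∧ 0 ≤ s.2 ∧ s.2 < PySem.List.len cs

-- ---- bitmask lemmas ----

lemma shift_cast (k : Nat) : (1 : Int) <<< k = ((1 <<< k : Nat) : Int) := by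
  simp [Int.shiftLeft_eq, Nat.shiftLeft_eq, push_cast]

lemma testBit_maskOf_gen (l : List Int) (m0 : Nat) (k : Nat) :
    (l.foldl (fun m i => m ||| 1 <<< i.toNat) m0).testBit k
      = (m0.testBit k || l.any (fun i => i.toNat == k)) := by
  induction l generalizing m0 with
  | nil => simp
  | cons a t ih =>
    simp only [List.foldl_cons, List.any_cons, ih]
    rw [Nat.testBit_or, Nat.one_shiftLeft, Nat.testBit_two_pow]
    by_cases h : a.toNat = k
    · simp [h]
    · rw [decide_eq_false h, show (a.toNat == k) = false from beq_eq_false_iff_ne.mpr h]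
      simp

lemma testBit_maskOf (l : List Int) (k : Nat) :
    (maskOf l).testBit k = l.any (fun i => i.toNat == k) := by
  rw [maskOf, testBit_maskOf_gen]; simp

lemma mem_maskOf_iff (l : List Int) (h : ∀ i ∈ l, 0 ≤ i) (k : Nat) :
    (maskOf l).testBit k = true ↔ (k : Int) ∈ l := by
  rw [testBit_maskOf]
  simp only [List.any_eq_true, beq_iff_eq]
  constructor
  · rintro ⟨i, hi, rfl⟩
    rwa [Int.toNat_of_nonneg (h i hi)]
  · intro hk; exact ⟨k, hk, by simp⟩

lemma maskOf_append (l : List Int) (w : Int) :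
    maskOf (l ++ [w]) = maskOf l ||| 1 <<< w.toNat := by
  simp [maskOf, List.foldl_append]

lemma maskOf_absorb (l : List Int) (w : Int) (hw : w ∈ l) :
    maskOf l ||| 1 <<< w.toNat = maskOf l := by
  apply Nat.eq_of_testBit_eq
  intro k
  rw [Nat.testBit_or, Nat.one_shiftLeft, Nat.testBit_two_pow, testBit_maskOf]
  by_cases h : w.toNat = k
  · subst h
    have hh : (List.any l fun i => i.toNat == w.toNat) = true :=
      List.any_eq_true.mpr ⟨w, hw, by simp⟩
    simp [hh]
  · simp [h]

lemma mem_tgtI (cs : List Char) (i : Int) :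
    i ∈ tgtI cs ↔ 0 ≤ i ∧ i < PySem.List.len cs ∧ PySem.List.pyGetD cs i 'A' ≠ 'A' := by
  simp [tgtI, List.mem_filter, PySem.List.mem_pyRange_one, and_assoc]

lemma nodup_pyRange_zero (n : Int) : (PySem.List.pyRange 0 n).Nodup := by
  by_cases h : n ≤ 0
  · have : PySem.List.pyRange 0 n = [] := by
      apply List.eq_nil_iff_forall_not_mem.mpr
      intro x hx
      rw [PySem.List.mem_pyRange_one] at hx
      omega
    simp [this]
  · obtain ⟨m, rfl⟩ : ∃ m : Nat, n = (m : Int) := ⟨n.toNat, (Int.toNat_of_nonneg (by omega)).symm⟩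
    rw [PySem.List.pyRange_zero_natCast]
    exact (List.nodup_range).map (fun a b => by exact_mod_cast id)

lemma nodup_tgtI (cs : List Char) : (tgtI cs).Nodup := by
  exact (nodup_pyRange_zero _).filter _

lemma band_full_bit_of_mem (cs : List Char) (w : Int) (hw : w ∈ tgtI cs) :
    fullN cs &&& 1 <<< w.toNat = 1 <<< w.toNat := by
  have h0 : 0 ≤ w := ((mem_tgtI cs w).mp hw).1
  apply Nat.eq_of_testBit_eq
  intro k
  rw [Nat.testBit_and, Nat.one_shiftLeft, Nat.testBit_two_pow]
  by_cases h : w.toNat = k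
  · subst h
    have : (fullN cs).testBit w.toNat = true := by
      rw [fullN, mem_maskOf_iff _ (fun i hi => ((mem_tgtI cs i).mp hi).1) w.toNat,
        Int.toNat_of_nonneg h0]
      exact hw
    simp [this]
  · simp [h]

lemma band_full_bit_of_not_mem (cs : List Char) (w : Int) (h0 : 0 ≤ w)
    (hw : w ∉ tgtI cs) : fullN cs &&& 1 <<< w.toNat = 0 := by
  apply Nat.eq_of_testBit_eq
  intro k
  rw [Nat.testBit_and, Nat.one_shiftLeft, Nat.testBit_two_pow]
  by_cases h : w.toNat = k
  · subst h
    have : ¬ (fullN cs).testBit w.toNat = true := by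
      rw [fullN, mem_maskOf_iff _ (fun i hi => ((mem_tgtI cs i).mp hi).1) w.toNat,
        Int.toNat_of_nonneg h0]
      exact hw
    simp [Bool.eq_false_iff.mpr this]
  · simp [h]

-- mask = full ⟺ all targets collected (for a nodup sub-list of the targets)
lemma mask_eq_full_iff (cs : List Char) (l : List Int) (hnd : l.Nodup)
    (hsub : ∀ i ∈ l, i ∈ tgtI cs) :
    maskOf l = fullN cs ↔ l.length = (tgtI cs).length := by
  have hnonneg : ∀ i ∈ l, (0:Int) ≤ i := fun i hi => ((mem_tgtI cs i).mp (hsub i hi)).1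
  have hnonneg' : ∀ i ∈ tgtI cs, (0:Int) ≤ i := fun i hi => ((mem_tgtI cs i).mp hi).1
  constructor
  · intro h
    have hmem : ∀ x, x ∈ l ↔ x ∈ tgtI cs := by
      intro x
      constructor
      · exact fun hx => hsub x hx
      · intro hx
        have h0 : 0 ≤ x := hnonneg' x hx
        have : (maskOf l).testBit x.toNat = true := by
          rw [h, show fullN cs = maskOf (tgtI cs) from rfl,
        mem_maskOf_iff _ hnonneg' x.toNat, Int.toNat_of_nonneg h0]
          exact hx
        rw [mem_maskOf_iff _ hnonneg x.toNat, Int.toNat_of_nonneg h0] at this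
        exact this
    exact ((List.perm_ext_iff_of_nodup hnd (nodup_tgtI cs)).mpr hmem).length_eq
  · intro hlen
    have hsp : l.Subperm (tgtI cs) := List.Nodup.subperm hnd hsub
    have hperm : l.Perm (tgtI cs) := hsp.perm_of_length_le (le_of_eq hlen.symm)
    apply Nat.eq_of_testBit_eq
    intro k
    rw [Bool.eq_iff_iff, fullN, mem_maskOf_iff _ hnonneg k, mem_maskOf_iff _ hnonneg' k]
    exact ⟨fun h => hperm.mem_iff.mp h, fun h => hperm.mem_iff.mpr h⟩

-- ---- chA / chU correspondence ----

lemma chA_eq_chU (cs : List Char) (lenV move : Int) (used : List Int) (v : Int) :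
    chA cs lenV move used v = (chU cs lenV (used, v)).map (fun t => (move + 1, t)) := by
  have hd1 : PySem.List.pySetD [v - 1, v + 1] 1 0 = [v - 1, 0] := by
    simp [PySem.List.pySetD, PySem.List.pySet?, PySem.List.pyIdx?]
  have hd2 : PySem.List.pySetD [v - 1, v + 1] 0 (lenV - 1) = [lenV - 1, v + 1] := by
    simp [PySem.List.pySetD, PySem.List.pySet?, PySem.List.pyIdx?]
  have hbody : (fun (acc : List (Int × List Int × Int)) w =>
      if PySem.List.pyGetD cs w 'A' = 'A' then acc ++ [(move + 1, used, w)]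
      else if w ∉ used then acc ++ [(move + 1, used ++ [w], w)]
      else acc ++ [(move + 1, used, w)]) = fun acc w => acc ++
        [(move + 1, (if PySem.List.pyGetD cs w 'A' = 'A' then used
           else if w ∉ used then used ++ [w] else used, w))] := by
    funext acc w; split_ifs <;> rfl
  simp only [chA, chU, hd1, hd2, hbody, PySem.List.foldl_append_singleton_eq_map,
    List.nil_append, List.map_map]
  rfl

lemma nodup_concat' (l : List Int) (w : Int) (h : w ∉ l) (hl : l.Nodup) : (l ++ [w]).Nodup := by
  simp [List.nodup_append, hl]
  exact fun a ha hc => h (hc ▸ ha)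

lemma mod_small (a n : Int) (h0 : 0 ≤ a) (h : a < n) : PySem.Int.mod a n = a := by
  rw [PySem.Int.mod_eq_emod_of_pos (by omega), Int.emod_eq_of_lt h0 h]

lemma mod_self' (n : Int) (h : 0 < n) : PySem.Int.mod n n = 0 := by
  rw [PySem.Int.mod_eq_emod_of_pos h, Int.emod_self]

lemma mod_neg_one (n : Int) (h : 0 < n) : PySem.Int.mod (-1) n = n - 1 := by
  rw [PySem.Int.mod_eq_emod_of_pos h]
  conv_lhs => rw [show (-1 : Int) = (n - 1) - n by ring]
  rw [Int.sub_emod_right, Int.emod_eq_of_lt (by omega) (by omega)]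

lemma length_chU (cs : List Char) (lenV : Int) (s : List Int × Int) :
    (chU cs lenV s).length = 2 := by
  rw [chU]; split_ifs <;> rfl

lemma length_LvlA (cs : List Char) (lenV : Int) (s0 : List Int × Int) (d : Nat) :
    (LvlA cs lenV s0 d).length = 2 ^ d := by
  induction d with
  | zero => rfl
  | succ d ih =>
    have : ∀ l : List (List Int × Int),
        (l.flatMap (chU cs lenV)).length = 2 * l.length := by
      intro l
      rw [List.length_flatMap]
      have : l.map (fun s => (chU cs lenV s).length) = l.map (fun _ => 2) :=
        List.map_congr_left (fun s _ => length_chU cs lenV s)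
      rw [this]; simp [Nat.mul_comm]
    rw [LvlA, this, ih]; ring

lemma chU_inv (cs : List Char) (s : List Int × Int) (hs : InvU cs s)
    (h2 : 2 ≤ cs.length) : ∀ t ∈ chU cs (PySem.List.len cs) s, InvU cs t := by
  obtain ⟨hnd, hsub, hv0, hvn⟩ := hs
  have hlen2 : (2 : Int) ≤ PySem.List.len cs := by
    rw [PySem.List.len_eq]; exact_mod_cast h2
  intro t ht
  rw [chU] at ht
  have hw : ∃ w, (0 ≤ w ∧ w < PySem.List.len cs) ∧
      t = (if PySem.List.pyGetD cs w 'A' = 'A' then s.1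
           else if w ∉ s.1 then s.1 ++ [w] else s.1, w) := by
    split_ifs at ht with h1 h2'
    · simp only [List.map_cons, List.map_nil, List.mem_cons,
        List.not_mem_nil, or_false] at ht
      rcases ht with rfl | rfl
      · exact ⟨s.2 - 1, ⟨by omega, by omega⟩, rfl⟩
      · exact ⟨0, ⟨by omega, by omega⟩, rfl⟩
    · simp only [List.map_cons, List.map_nil, List.mem_cons,
        List.not_mem_nil, or_false] at ht
      rcases ht with rfl | rfl
      · exact ⟨PySem.List.len cs - 1, ⟨by omega, by omega⟩, rfl⟩
      · exact ⟨s.2 + 1, ⟨by omega, by omega⟩, rfl⟩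
    · simp only [List.map_cons, List.map_nil, List.mem_cons,
        List.not_mem_nil, or_false] at ht
      rcases ht with rfl | rfl
      · exact ⟨s.2 - 1, ⟨by omega, by omega⟩, rfl⟩
      · exact ⟨s.2 + 1, ⟨by omega, by omega⟩, rfl⟩
  obtain ⟨w, ⟨hw0, hwn⟩, rfl⟩ := hw
  have hc : (if PySem.List.pyGetD cs w 'A' = 'A' then s.1
      else if w ∉ s.1 then s.1 ++ [w] else s.1).Nodup ∧
      (∀ i ∈ (if PySem.List.pyGetD cs w 'A' = 'A' then s.1
        else if w ∉ s.1 then s.1 ++ [w] else s.1), i ∈ tgtI cs) := by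
    by_cases hA : PySem.List.pyGetD cs w 'A' = 'A'
    · rw [if_pos hA]; exact ⟨hnd, hsub⟩
    · by_cases hm : w ∈ s.1
      · rw [if_neg hA, if_neg (not_not_intro hm)]; exact ⟨hnd, hsub⟩
      · rw [if_neg hA, if_pos hm]
        refine ⟨nodup_concat' s.1 w hm hnd, ?_⟩
        intro i hi
        rcases List.mem_append.mp hi with hi | hi
        · exact hsub i hi
        · rw [List.mem_singleton] at hi
          subst hi
          exact (mem_tgtI cs i).mpr ⟨hw0, hwn, hA⟩
  exact ⟨hc.1, hc.2, hw0, hwn⟩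

lemma childMask (cs : List Char) (used : List Int) (w : Int)
    (h0 : 0 ≤ w) (hn : w < PySem.List.len cs) :
    absU ((if PySem.List.pyGetD cs w 'A' = 'A' then used
           else if w ∉ used then used ++ [w] else used), w)
      = (w, PySem.Int.bor ((maskOf used : Nat) : Int)
          (PySem.Int.band ((fullN cs : Nat) : Int) ((1 : Int) <<< w.toNat))) := by
  rw [shift_cast, PySem.Int.band_natCast]
  by_cases hA : PySem.List.pyGetD cs w 'A' = 'A'
  · rw [if_pos hA,
      band_full_bit_of_not_mem cs w h0 (by rw [mem_tgtI]; push Not; exact fun _ _ => hA),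
      show ((0 : Nat) : Int) = (((0 : Nat) : Nat) : Int) from rfl,
      PySem.Int.bor_natCast]
    simp [absU]
  · have hwt : w ∈ tgtI cs := (mem_tgtI cs w).mpr ⟨h0, hn, hA⟩
    by_cases hm : w ∈ used
    · rw [if_neg hA, if_neg (not_not_intro hm), band_full_bit_of_mem cs w hwt,
        PySem.Int.bor_natCast, maskOf_absorb used w hm]
      simp [absU]
    · rw [if_neg hA, if_pos hm, band_full_bit_of_mem cs w hwt,
        PySem.Int.bor_natCast, ← maskOf_append used w]
      simp [absU]

lemma chU_absU (cs : List Char) (s : List Int × Int) (hs : InvU cs s)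
    (h2 : 2 ≤ cs.length) :
    (chU cs (PySem.List.len cs) s).map absU = chB ((fullN cs : Int)) (PySem.List.len cs) (absU s) := by
  obtain ⟨hnd, hsub, hv0, hvn⟩ := hs
  have hlen2 : (2 : Int) ≤ PySem.List.len cs := by
    rw [PySem.List.len_eq]; exact_mod_cast h2
  have hpos : (0 : Int) < PySem.List.len cs := by omega
  rw [chU, chB]
  simp only [absU]
  split_ifs with h1 h2'
  · rw [show PySem.Int.mod (s.2 - 1) (PySem.List.len cs) = s.2 - 1 from
        mod_small _ _ (by omega) (by omega),
      show PySem.Int.mod (s.2 + 1) (PySem.List.len cs) = 0 from by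
        rw [h1, show PySem.List.len cs - 1 + 1 = PySem.List.len cs by ring]
        exact mod_self' _ hpos]
    simp only [List.map_cons, List.map_nil]
    rw [show (0 : Int) = s.2 + 1 - (s.2 + 1) by ring] at *
    rw [childMask cs s.1 (s.2 - 1) (by omega) (by omega),
      childMask cs s.1 (s.2 + 1 - (s.2 + 1)) (by omega) (by omega)]
  · rw [show PySem.Int.mod (s.2 - 1) (PySem.List.len cs) = PySem.List.len cs - 1 from by
        rw [h2', show (0 : Int) - 1 = -1 by ring]
        exact mod_neg_one _ hpos,
      show PySem.Int.mod (s.2 + 1) (PySem.List.len cs) = s.2 + 1 from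
        mod_small _ _ (by omega) (by omega)]
    simp only [List.map_cons, List.map_nil]
    rw [childMask cs s.1 (PySem.List.len cs - 1) (by omega) (by omega),
      childMask cs s.1 (s.2 + 1) (by omega) (by omega)]
  · rw [show PySem.Int.mod (s.2 - 1) (PySem.List.len cs) = s.2 - 1 from
        mod_small _ _ (by omega) (by omega),
      show PySem.Int.mod (s.2 + 1) (PySem.List.len cs) = s.2 + 1 from
        mod_small _ _ (by omega) (by omega)]
    simp only [List.map_cons, List.map_nil]
    rw [childMask cs s.1 (s.2 - 1) (by omega) (by omega),
      childMask cs s.1 (s.2 + 1) (by omega) (by omega)]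

-- ---- queue runs level by level ----

lemma loopA_consume (cs : List Char) (lenV G : Int) (d : Nat) :
    ∀ (xs ys : List (List Int × Int)) (f : Nat) (ans : Int),
    (∀ s ∈ xs, ¬ ((s.1.length : Int) = G)) →
    loopA cs lenV G (xs.length + f)
      (xs.map (fun s => (((d : Nat) : Int), s)) ++ ys.map (fun s => (((d : Nat) : Int) + 1, s))) ans
    = loopA cs lenV G f ((ys ++ xs.flatMap (chU cs lenV)).map (fun s => (((d : Nat) : Int) + 1, s))) ans := by
  intro xs
  induction xs with
  | nil =>
    intro ys f ans _
    simp
  | cons s xs ih =>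
    intro ys f ans hnf
    obtain ⟨u, v⟩ := s
    have hs : ¬ ((u.length : Int) = G) := hnf (u, v) List.mem_cons_self
    simp only [List.map_cons, List.cons_append, List.length_cons]
    rw [show xs.length + 1 + f = (xs.length + f) + 1 by omega]
    rw [loopA]
    rw [if_neg (by rw [PySem.List.len_eq]; exact hs)]
    rw [chA_eq_chU, List.append_assoc, ← List.map_append]
    have := ih (ys ++ chU cs lenV (u, v)) f ans (fun t ht => hnf t (List.mem_cons_of_mem _ ht))
    rw [this, List.flatMap_cons]
    rw [List.append_assoc]

lemma loopA_break (cs : List Char) (lenV G : Int) (d : Nat) :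
    ∀ (xs : List (List Int × Int)) (f : Nat) (rest : List (Int × List Int × Int)) (ans : Int),
    xs.length ≤ f → (∃ s ∈ xs, (s.1.length : Int) = G) →
    loopA cs lenV G f (xs.map (fun s => (((d : Nat) : Int), s)) ++ rest) ans = ans + d := by
  intro xs
  induction xs with
  | nil =>
    rintro f rest ans _ ⟨s, hs, _⟩
    cases hs
  | cons s xs ih =>
    intro f rest ans hf hex
    obtain ⟨u, v⟩ := s
    obtain ⟨f, rfl⟩ : ∃ f', f = f' + 1 := ⟨f - 1, by simp at hf; omega⟩
    simp only [List.map_cons, List.cons_append]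
    rw [loopA]
    by_cases hfull : PySem.List.len u = G
    · rw [if_pos hfull]
    · rw [if_neg hfull]
      have hex' : ∃ t ∈ xs, ((t.1.length : Int) = G) := by
        rcases hex with ⟨t, ht, htG⟩
        rcases List.mem_cons.mp ht with rfl | ht'
        · exact absurd (by rw [PySem.List.len_eq]; exact htG) hfull
        · exact ⟨t, ht', htG⟩
      rw [List.append_assoc]
      exact ih f _ ans (by simp at hf ⊢; omega) hex'

-- ---- the guaranteed hit: walking right visits everything by depth len - 1 ----

def uR (cs : List Char) (d : Nat) : List Int :=
  (PySem.List.pyRange 0 ((d : Int) + 1)).filter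
    (fun i => PySem.List.pyGetD cs i 'A' ≠ 'A')

lemma uR_mem (cs : List Char) (d : Nat) (i : Int) :
    i ∈ uR cs d ↔ 0 ≤ i ∧ i < (d : Int) + 1 ∧ PySem.List.pyGetD cs i 'A' ≠ 'A' := by
  simp [uR, List.mem_filter, PySem.List.mem_pyRange_one, and_assoc]

lemma RW_mem_LvlA (cs : List Char) (h2 : 2 ≤ cs.length) :
    ∀ d : Nat, d < cs.length →
    (uR cs d, (d : Int)) ∈ LvlA cs (PySem.List.len cs)
      (uR cs 0, (0 : Int)) d := by
  have hlen2 : (2 : Int) ≤ PySem.List.len cs := by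
    rw [PySem.List.len_eq]; exact_mod_cast h2
  intro d
  induction d with
  | zero => intro _; simp [LvlA]
  | succ d ih =>
    intro hd1
    have hd : d < cs.length := by omega
    have hlt : (d : Int) < PySem.List.len cs - 1 := by
      rw [PySem.List.len_eq]; omega
    rw [LvlA]
    apply List.mem_flatMap.mpr
    refine ⟨(uR cs d, (d : Int)), ih hd, ?_⟩
    have hnotmem : ((d : Int) + 1) ∉ uR cs d := by
      rw [uR_mem]; push Not; intro _ h; omega
    have hchild : (if PySem.List.pyGetD cs ((d : Int) + 1) 'A' = 'A' then uR cs d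
        else if ((d : Int) + 1) ∉ uR cs d then uR cs d ++ [(d : Int) + 1] else uR cs d)
        = uR cs (d + 1) := by
      have hsplit : uR cs (d + 1) = uR cs d ++
          (if PySem.List.pyGetD cs ((d : Int) + 1) 'A' = 'A' then []
           else [(d : Int) + 1]) := by
        rw [uR, show (((d + 1 : Nat) : Int)) + 1 = ((d : Int) + 1) + 1 from by push_cast; ring,
          PySem.List.pyRange_one_succ_right (by omega), List.filter_append]
        rw [uR]
        congr 1
        by_cases hA : PySem.List.pyGetD cs ((d : Int) + 1) 'A' = 'A'
        · simp [hA]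
        · simp [hA]
      by_cases hA : PySem.List.pyGetD cs ((d : Int) + 1) 'A' = 'A'
      · rw [if_pos hA, hsplit, if_pos hA, List.append_nil]
      · rw [if_neg hA, if_pos hnotmem, hsplit, if_neg hA]
    rw [chU]
    rw [if_neg (show ¬ ((uR cs d, (d : Int)).2 = PySem.List.len cs - 1) from by
      simp only []; omega)]
    by_cases hd0 : ((uR cs d, (d : Int)).2 : Int) = 0
    · rw [if_pos hd0]
      apply List.mem_map.mpr
      refine ⟨(d : Int) + 1, by simp, ?_⟩
      simp only []
      rw [hchild]
      norm_cast
    · rw [if_neg hd0]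
      apply List.mem_map.mpr
      refine ⟨(d : Int) + 1, by simp, ?_⟩
      simp only []
      rw [hchild]
      norm_cast

lemma uR_last (cs : List Char) (h1 : 1 ≤ cs.length) :
    uR cs (cs.length - 1) = tgtI cs := by
  rw [uR, tgtI, show (((cs.length - 1 : Nat) : Int)) + 1 = PySem.List.len cs from by
    rw [PySem.List.len_eq]; omega]

-- ---- lockstep: A's queue and B's frontier produce the same depth ----

-- when the current level contains a completed state, A breaks with `answer + d`
-- and B's while-condition fails at depth d
lemma lockstep_break (cs : List Char) (d : Nat)
    (hInv : ∀ s ∈ LvlA cs (PySem.List.len cs) (uR cs 0, (0 : Int)) d, InvU cs s)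
    (fA fB : Nat) (ans : Int) (fr : PySem.Set (Int × Int))
    (hfA : 2 ^ d ≤ fA) (hfB : 1 ≤ fB)
    (hfr : ∀ x, x ∈ fr ↔ ∃ s ∈ LvlA cs (PySem.List.len cs) (uR cs 0, (0 : Int)) d, absU s = x)
    (hfull : ∃ s ∈ LvlA cs (PySem.List.len cs) (uR cs 0, (0 : Int)) d,
      ((s.1.length : Int) = ((tgtI cs).length : Int))) :
    loopA cs (PySem.List.len cs) ((tgtI cs).length : Int) fA
      ((LvlA cs (PySem.List.len cs) (uR cs 0, (0 : Int)) d).map (fun s => (((d : Nat) : Int), s))) ans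
    = ans + loopB ((fullN cs : Int)) (PySem.List.len cs) fB fr ((d : Nat) : Int) := by
  obtain ⟨f, rfl⟩ : ∃ f, fB = f + 1 := ⟨fB - 1, by omega⟩
  have hA := loopA_break cs (PySem.List.len cs) ((tgtI cs).length : Int) d
    (LvlA cs (PySem.List.len cs) (uR cs 0, (0 : Int)) d) fA [] ans
    (by rw [length_LvlA]; exact hfA) hfull
  rw [List.append_nil] at hA
  rw [hA, loopB]
  have hall : (fr.all fun s => s.2 != ((fullN cs : Nat) : Int)) = false := by
    obtain ⟨s, hsm, hsG⟩ := hfull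
    obtain ⟨hnd, hsub, _, _⟩ := hInv s hsm
    have hmask : ((maskOf s.1 : Nat) : Int) = ((fullN cs : Nat) : Int) := by
      exact_mod_cast congrArg (fun m : Nat => (m : Int))
        ((mask_eq_full_iff cs s.1 hnd hsub).mpr (by exact_mod_cast hsG))
    refine List.all_eq_false.mpr ⟨absU s, (hfr _).mpr ⟨s, hsm, rfl⟩, ?_⟩
    simp [absU, hmask]
  rw [hall]
  simp

lemma lockstep (cs : List Char) (h2 : 2 ≤ cs.length) :
    ∀ (k d : Nat), cs.length - 1 = d + k →
    (∀ s ∈ LvlA cs (PySem.List.len cs) (uR cs 0, (0 : Int)) d, InvU cs s) →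
    ∀ (fA fB : Nat) (ans : Int) (fr : PySem.Set (Int × Int)),
    2 ^ cs.length - 2 ^ d ≤ fA → cs.length - d ≤ fB →
    (∀ x, x ∈ fr ↔ ∃ s ∈ LvlA cs (PySem.List.len cs) (uR cs 0, (0 : Int)) d, absU s = x) →
    loopA cs (PySem.List.len cs) ((tgtI cs).length : Int) fA
      ((LvlA cs (PySem.List.len cs) (uR cs 0, (0 : Int)) d).map (fun s => (((d : Nat) : Int), s))) ans
    = ans + loopB ((fullN cs : Int)) (PySem.List.len cs) fB fr ((d : Nat) : Int) := by
  intro k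
  induction k with
  | zero =>
    intro d hdk hInv fA fB ans fr hfA hfB hfr
    have hfull : ∃ s ∈ LvlA cs (PySem.List.len cs) (uR cs 0, (0 : Int)) d,
        ((s.1.length : Int) = ((tgtI cs).length : Int)) := by
      refine ⟨(uR cs d, (d : Int)), RW_mem_LvlA cs h2 d (by omega), ?_⟩
      simp only []
      rw [show d = cs.length - 1 by omega, uR_last cs (by omega)]
    refine lockstep_break cs d hInv fA fB ans fr ?_ (by omega) hfr hfull
    · have hp := Nat.pow_le_pow_right (show 1 ≤ 2 by norm_num) (show d + 1 ≤ cs.length by omega)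
      rw [pow_succ] at hp
      omega
  | succ k ih =>
    intro d hdk hInv fA fB ans fr hfA hfB hfr
    by_cases hfull : ∃ s ∈ LvlA cs (PySem.List.len cs) (uR cs 0, (0 : Int)) d,
        ((s.1.length : Int) = ((tgtI cs).length : Int))
    · refine lockstep_break cs d hInv fA fB ans fr ?_ (by omega) hfr hfull
      have hp := Nat.pow_le_pow_right (show 1 ≤ 2 by norm_num) (show d + 1 ≤ cs.length by omega)
      rw [pow_succ] at hp
      omega
    · -- no completed state at this level: both sides advance one level
      push Not at hfull
      have hp := Nat.pow_le_pow_right (show 1 ≤ 2 by norm_num) (show d + 1 ≤ cs.length by omega)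
      rw [pow_succ] at hp
      obtain ⟨f, rfl⟩ : ∃ f, fB = f + 1 := ⟨fB - 1, by omega⟩
      -- A side: consume the whole level
      have hcons := loopA_consume cs (PySem.List.len cs) ((tgtI cs).length : Int) d
        (LvlA cs (PySem.List.len cs) (uR cs 0, (0 : Int)) d) [] (fA - 2 ^ d) ans hfull
      rw [List.map_nil, List.append_nil, List.nil_append,
        show (LvlA cs (PySem.List.len cs) (uR cs 0, (0 : Int)) d).length + (fA - 2 ^ d) = fA from by
          rw [length_LvlA]; omega] at hcons
      rw [hcons]
      -- B side: the while-condition holds, take one step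
      rw [loopB]
      have hall : (fr.all fun s => s.2 != ((fullN cs : Nat) : Int)) = true := by
        refine List.all_eq_true.mpr ?_
        intro x hx
        obtain ⟨s, hsm, rfl⟩ := (hfr x).mp hx
        obtain ⟨hnd, hsub, _, _⟩ := hInv s hsm
        have hne : maskOf s.1 ≠ fullN cs := by
          intro hm
          exact hfull s hsm (by exact_mod_cast (mask_eq_full_iff cs s.1 hnd hsub).mp hm)
        simp only [absU, bne_iff_ne, ne_eq]
        exact_mod_cast hne
      rw [hall, if_pos rfl]
      -- invariants for the next level
      have hInv' : ∀ s ∈ LvlA cs (PySem.List.len cs) (uR cs 0, (0 : Int)) (d + 1), InvU cs s := by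
        intro s hs
        rw [LvlA] at hs
        obtain ⟨p, hp', hsp⟩ := List.mem_flatMap.mp hs
        exact chU_inv cs p (hInv p hp') h2 s hsp
      have hfr' : ∀ x, x ∈ PySem.Set.ofList (fr.flatMap (chB ((fullN cs : Nat) : Int) (PySem.List.len cs)))
          ↔ ∃ s ∈ LvlA cs (PySem.List.len cs) (uR cs 0, (0 : Int)) (d + 1), absU s = x := by
        intro x
        rw [PySem.Set.mem_ofList, List.mem_flatMap]
        constructor
        · rintro ⟨t, htm, hxt⟩
          obtain ⟨s, hsm, rfl⟩ := (hfr t).mp htm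
          rw [← chU_absU cs s (hInv s hsm) h2] at hxt
          obtain ⟨c, hcm, rfl⟩ := List.mem_map.mp hxt
          exact ⟨c, by rw [LvlA]; exact List.mem_flatMap.mpr ⟨s, hsm, hcm⟩, rfl⟩
        · rintro ⟨c, hcm, rfl⟩
          rw [LvlA] at hcm
          obtain ⟨s, hsm, hcs⟩ := List.mem_flatMap.mp hcm
          refine ⟨absU s, (hfr _).mpr ⟨s, hsm, rfl⟩, ?_⟩
          rw [← chU_absU cs s (hInv s hsm) h2]
          exact List.mem_map.mpr ⟨c, hcs, rfl⟩
      have := ih (d + 1) (by omega) hInv' (fA - 2 ^ d) f ans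
        (PySem.Set.ofList (fr.flatMap (chB ((fullN cs : Nat) : Int) (PySem.List.len cs))))
        (by omega) (by omega) hfr'
      rw [show (((d + 1 : Nat) : Int)) = ((d : Nat) : Int) + 1 from by push_cast; ring,
        show LvlA cs (PySem.List.len cs) (uR cs 0, (0 : Int)) (d + 1)
          = List.flatMap (chU cs (PySem.List.len cs))
              (LvlA cs (PySem.List.len cs) (uR cs 0, (0 : Int)) d) from rfl] at this
      rw [this]

-- ---- assembling the two ports ----

lemma foldl_bor_cast (l : List Int) (m0 : Nat) :
    l.foldl (fun m i => PySem.Int.bor m ((1 : Int) <<< (i.toNat : Nat))) ((m0 : Nat) : Int)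
      = ((l.foldl (fun m i => m ||| 1 <<< i.toNat) m0 : Nat) : Int) := by
  induction l generalizing m0 with
  | nil => rfl
  | cons a t ih =>
    simp only [List.foldl_cons]
    rw [shift_cast a.toNat, PySem.Int.bor_natCast, ih]

lemma fullB_eq (cs : List Char) :
    (PySem.List.enumerate cs).foldl
      (fun m p => if p.2 ≠ 'A' then PySem.Int.bor m ((1 : Int) <<< (p.1.toNat : Nat)) else m) 0
    = ((fullN cs : Nat) : Int) := by
  rw [PySem.List.enumerate_eq_map_pyRange cs 'A', List.foldl_map]
  rw [show (fun (x : Int) (y : Int) =>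
      if (y, PySem.List.pyGetD cs y 'A').2 ≠ 'A' then
        PySem.Int.bor x ((1 : Int) <<< (((y, PySem.List.pyGetD cs y 'A').1).toNat : Nat))
      else x)
    = fun (x : Int) (y : Int) =>
      if PySem.List.pyGetD cs y 'A' ≠ 'A' then
        PySem.Int.bor x ((1 : Int) <<< (y.toNat : Nat))
      else x from rfl]
  rw [PySem.List.foldl_ite_eq_foldl_filter
    (p := fun j : Int => PySem.List.pyGetD cs j 'A' ≠ 'A')
    (f := fun m j => PySem.Int.bor m ((1 : Int) <<< (j.toNat : Nat)))]
  rw [show (0 : Int) = ((0 : Nat) : Int) from rfl, foldl_bor_cast]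
  rfl

lemma pA_eq (cs : List Char) :
    (PySem.List.pyRange 0 (PySem.List.len cs)).foldl
      (fun (ac : Int × Int) i =>
        if PySem.List.pyGetD cs i 'A' ≠ 'A' then
          (ac.1 + min |65 - ((PySem.List.pyGetD cs i 'A').toNat : Int)|
                      (|90 - ((PySem.List.pyGetD cs i 'A').toNat : Int)| + 1),
           ac.2 + 1)
        else ac) (0, 0)
    = (((cs.filter (fun c => c ≠ 'A')).map
          (fun c => min |(c.toNat : Int) - 65| (|90 - (c.toNat : Int)| + 1))).sum,
       ((tgtI cs).length : Int)) := by
  rw [PySem.List.foldl_pyRange_pyGetD cs 'A'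
    (f := fun (ac : Int × Int) c =>
      if c ≠ 'A' then
        (ac.1 + min |65 - (c.toNat : Int)| (|90 - (c.toNat : Int)| + 1), ac.2 + 1)
      else ac) (init := ((0 : Int), (0 : Int))) le_rfl]
  rw [show Int.toNat 0 = 0 from rfl, List.drop_zero]
  have hbody : (fun (ac : Int × Int) (c : Char) =>
      if c ≠ 'A' then
        (ac.1 + min |65 - (c.toNat : Int)| (|90 - (c.toNat : Int)| + 1), ac.2 + 1)
      else ac)
    = fun (ac : Int × Int) (c : Char) =>
      ((fun (a : Int) (c : Char) => if c ≠ 'A' then a + min |65 - (c.toNat : Int)| (|90 - (c.toNat : Int)| + 1) else a) ac.1 c,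
       (fun (a : Int) (c : Char) => if c ≠ 'A' then a + 1 else a) ac.2 c) := by
    funext ac c
    simp only []
    split_ifs <;> rfl
  rw [hbody, PySem.List.foldl_prod_mk
    (f := fun (a : Int) (c : Char) => if c ≠ 'A' then a + min |65 - (c.toNat : Int)| (|90 - (c.toNat : Int)| + 1) else a)
    (g := fun (a : Int) (c : Char) => if c ≠ 'A' then a + 1 else a)]
  have hlenf : (cs.filter (fun c => decide (c ≠ 'A'))).length = (tgtI cs).length := by
    conv_lhs => rw [show cs = (PySem.List.pyRange 0 (PySem.List.len cs)).map
        (fun j => PySem.List.pyGetD cs j 'A') from (PySem.List.map_pyGetD_pyRange_zero cs 'A').symm]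
    rw [List.filter_map, List.length_map, tgtI]
    rfl
  simp only [Prod.mk.injEq]
  constructor
  · rw [PySem.List.foldl_ite_eq_foldl_filter
      (p := fun c : Char => c ≠ 'A')
      (f := fun (a : Int) (c : Char) => a + min |65 - (c.toNat : Int)| (|90 - (c.toNat : Int)| + 1))]
    rw [PySem.List.foldl_add, zero_add]
    apply congrArg
    apply List.map_congr_left
    intro c _
    rw [abs_sub_comm]
  · rw [PySem.List.foldl_ite_eq_foldl_filter
      (p := fun c : Char => c ≠ 'A')
      (f := fun (a : Int) (_ : Char) => a + 1)]
    rw [PySem.List.foldl_add (g := fun _ : Char => (1 : Int)), zero_add,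
      PySem.List.sum_map_const_int, hlenf]
    ring

lemma mask_uR0 (cs : List Char) (h1 : 1 ≤ cs.length) :
    maskOf (uR cs 0) = fullN cs &&& 1 := by
  have hlen1 : (1 : Int) ≤ PySem.List.len cs := by rw [PySem.List.len_eq]; omega
  have hR : PySem.List.pyRange 0 ((0 : Nat) + 1 : Int) = [0] := by norm_num; decide
  by_cases hA : PySem.List.pyGetD cs 0 'A' = 'A'
  · have h0 : (0 : Int) ∉ tgtI cs := by rw [mem_tgtI]; push Not; exact fun _ _ => hA
    have := band_full_bit_of_not_mem cs 0 le_rfl h0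
    rw [show ((0 : Int).toNat) = 0 from rfl, show (1 <<< 0 : Nat) = 1 from rfl] at this
    rw [this, uR, hR]
    simp [hA, maskOf]
  · have h0 : (0 : Int) ∈ tgtI cs := (mem_tgtI cs 0).mpr ⟨le_rfl, by omega, hA⟩
    have := band_full_bit_of_mem cs 0 h0
    rw [show ((0 : Int).toNat) = 0 from rfl, show (1 <<< 0 : Nat) = 1 from rfl] at this
    rw [this, uR, hR]
    simp [hA, maskOf]

lemma fullN_and_one (cs : List Char) (h1 : cs.length = 1) :
    fullN cs &&& 1 = fullN cs := by
  apply Nat.eq_of_testBit_eq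
  intro k
  rw [Nat.testBit_and]
  cases k with
  | zero => simp
  | succ j =>
    have hf : ¬ (fullN cs).testBit (j + 1) = true := by
      rw [fullN, mem_maskOf_iff _ (fun i hi => ((mem_tgtI cs i).mp hi).1), mem_tgtI,
        PySem.List.len_eq, h1]
      push Not
      intro _ h
      omega
    simp [Bool.eq_false_iff.mpr hf]

lemma used0_eq (cs : List Char) (h : cs ≠ []) :
    (if PySem.List.pyGetD cs 0 ' ' ≠ 'A' then ([0] : List Int) else []) = uR cs 0 := by
  obtain ⟨c, t, rfl⟩ : ∃ c t, cs = c :: t := by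
    cases cs with
    | nil => exact absurd rfl h
    | cons c t => exact ⟨c, t, rfl⟩
  rw [uR, show ((0 : Nat) : Int) + 1 = 1 from rfl,
    show PySem.List.pyRange 0 1 = [0] from by decide]
  by_cases hc : c = 'A' <;> simp [pysem, hc]

-- ===== VERDICT (by name: the statement is the Claim_ definition above) =====
theorem solution_spec : Claim_equal_solution := by
  unfold Claim_equal_solution
  intro name _ hpre
  unfold Spec_solution
  have hcs : name.toList ≠ [] := fun h => hpre (String.toList_eq_nil_iff.mp h)
  have h1 : 1 ≤ name.toList.length := by
    cases hl : name.toList with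
    | nil => exact absurd hl hcs
    | cons a t => simp
  simp only [solution, solution_alt]
  rw [pA_eq, fullB_eq, used0_eq _ hcs]
  simp only []
  set cs := name.toList with hcsdef
  have habs0 : ((maskOf (uR cs 0) : Nat) : Int) = PySem.Int.band ((fullN cs : Nat) : Int) 1 := by
    rw [show (1 : Int) = ((1 : Nat) : Int) from rfl, PySem.Int.band_natCast,
      mask_uR0 cs h1]
  by_cases h2 : 2 ≤ cs.length
  · -- general case: run the two loops in lockstep, level by level
    have hInv0 : ∀ s ∈ LvlA cs (PySem.List.len cs) (uR cs 0, (0 : Int)) 0, InvU cs s := by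
      intro s hs
      rw [show LvlA cs (PySem.List.len cs) (uR cs 0, (0 : Int)) 0 = [(uR cs 0, (0 : Int))] from rfl,
        List.mem_singleton] at hs
      subst hs
      refine ⟨(nodup_pyRange_zero _).filter _, ?_, le_rfl, by rw [PySem.List.len_eq]; omega⟩
      intro i hi
      rw [uR_mem] at hi
      refine (mem_tgtI cs i).mpr ⟨hi.1, by rw [PySem.List.len_eq]; omega, hi.2.2⟩
    have hfr0 : ∀ x, x ∈ PySem.Set.ofList [((0 : Int), PySem.Int.band ((fullN cs : Nat) : Int) 1)]
        ↔ ∃ s ∈ LvlA cs (PySem.List.len cs) (uR cs 0, (0 : Int)) 0, absU s = x := by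
      intro x
      rw [PySem.Set.mem_ofList]
      constructor
      · intro hx
        rw [List.mem_singleton] at hx
        exact ⟨(uR cs 0, (0 : Int)), by rw [show LvlA cs (PySem.List.len cs) (uR cs 0, (0 : Int)) 0
          = [(uR cs 0, (0 : Int))] from rfl]; simp, by rw [absU, habs0, hx]⟩
      · rintro ⟨s, hs, rfl⟩
        rw [show LvlA cs (PySem.List.len cs) (uR cs 0, (0 : Int)) 0
          = [(uR cs 0, (0 : Int))] from rfl, List.mem_singleton] at hs
        subst hs
        rw [absU, habs0]
        simp
    have hls := lockstep cs h2 (cs.length - 1) 0 (by omega) hInv0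
      (2 ^ cs.length) (cs.length + 1)
      (((cs.filter (fun c => c ≠ 'A')).map
        (fun c => min |(c.toNat : Int) - 65| (|90 - (c.toNat : Int)| + 1))).sum)
      (PySem.Set.ofList [((0 : Int), PySem.Int.band ((fullN cs : Nat) : Int) 1)])
      (Nat.sub_le _ _) (by omega) hfr0
    rw [show LvlA cs (PySem.List.len cs) (uR cs 0, (0 : Int)) 0
      = [(uR cs 0, (0 : Int))] from rfl] at hls
    simpa using hls
  · -- a single-character name: both loops stop immediately
    have hlen1 : cs.length = 1 := by omega
    have hG : uR cs 0 = tgtI cs := by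
      have := uR_last cs (by omega)
      rwa [show cs.length - 1 = 0 from by omega] at this
    rw [show (2 : Nat) ^ cs.length = 2 from by rw [hlen1, pow_one], hG, loopA,
      if_pos (by rw [PySem.List.len_eq])]
    rw [show cs.length + 1 = 1 + 1 from by rw [hlen1], loopB]
    have hfull1 : PySem.Int.band ((fullN cs : Nat) : Int) 1 = ((fullN cs : Nat) : Int) := by
      rw [show (1 : Int) = ((1 : Nat) : Int) from rfl, PySem.Int.band_natCast,
        fullN_and_one cs hlen1]
    have hall : (PySem.Set.ofList [((0 : Int), PySem.Int.band ((fullN cs : Nat) : Int) 1)]).all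
        (fun s => s.2 != ((fullN cs : Nat) : Int)) = false := by
      rw [show PySem.Set.ofList [((0 : Int), PySem.Int.band ((fullN cs : Nat) : Int) 1)]
        = [((0 : Int), PySem.Int.band ((fullN cs : Nat) : Int) 1)] from rfl]
      simp [hfull1]
    rw [hall]
    simp
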